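-- pv_equiv track=rewrite | github.com/yashgupta2022/2048-GAME | 2048.py | current_status
-- ===== SOURCE A (Python) =====
-- def current_status(mat):
--     #GAME WON
--     for i in range(4):
--         for j in range(4):
--             if mat[i][j]==2048:
--                 return 1
--
--     #GAME LEFT - IF ANY CELLS ARE EMPTY
--     for i in range(4):
--         for j in range(4):
--             if mat[i][j]== 0:
--                 return 0
--     #GAME LEFT - ALL CELLS ARE FILLED
--     #If any cell has identical cell in next row
--     for i in range(3):
--         for j in range(4):
--             if mat[i][j]== mat[i+1][j]:
--                 return 0
--     #If any cell has identical cell in next column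
--     for i in range(4):
--         for j in range(3):
--             if mat[i][j]== mat[i][j+1]:
--                 return 0
--     #GAME OVER
--     return -1
-- ===== SOURCE B (Python) =====
-- def current_status(mat):
--     # Single recursive pass over the 4 rows, carrying the previous row to detect
--     # vertical merges; accumulates won/empty/mergeable flags, decided at the end.
--     def go(i, prev):
--         if i == 4:
--             return False, False, False
--         row = mat[i]
--         won = empty = merge = False
--         last = None
--         for j in range(4):
--             x = row[j]
--             if x == 2048:
--                 won = True
--             if x == 0:
--                 empty = True
--             if (last is not None and x == last) or (prev is not None and x == prev[j]):
--                 merge = True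
--             last = x
--         w2, e2, m2 = go(i + 1, row)
--         return won or w2, empty or e2, merge or m2
--     won, empty, merge = go(0, None)
--     if won:
--         return 1
--     if empty:
--         return 0
--     if merge:
--         return 0
--     return -1
-- ===== Notes on version B (the rewrite author's own statement) =====
-- stated objective: alternative
-- what changed: Replaces A's four staged nested index scans with one recursive pass over the rows that carries the previous row and accumulates won/empty/mergeable flags for every cell in a single visit, deciding the result from the flags at the end.
-- outside the precondition, e.g. on current_status([[2048]]): A returns 1, B raises IndexError; on current_status([[2048, 1], [2, 3]]): A returns 1, B raises IndexError
import Mathlib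
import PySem

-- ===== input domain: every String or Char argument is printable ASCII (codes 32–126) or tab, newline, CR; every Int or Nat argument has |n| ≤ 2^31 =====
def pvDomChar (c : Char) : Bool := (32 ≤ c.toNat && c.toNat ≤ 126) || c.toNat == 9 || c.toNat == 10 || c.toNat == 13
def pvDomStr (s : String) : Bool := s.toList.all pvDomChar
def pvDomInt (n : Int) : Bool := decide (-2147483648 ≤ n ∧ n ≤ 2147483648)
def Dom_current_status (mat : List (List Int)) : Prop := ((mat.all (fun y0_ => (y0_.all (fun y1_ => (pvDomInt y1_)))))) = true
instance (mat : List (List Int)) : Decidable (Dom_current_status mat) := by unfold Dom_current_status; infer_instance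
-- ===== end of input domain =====

-- B replaces A's four staged nested index scans by one recursive pass over the rows
-- carrying the previous row and accumulating won/empty/mergeable flags (alternative decomposition).


-- ===== PORT A =====
-- mat[i][j]: under Pre_ every index A reads is in range, so the .getD default is unreachable.
def aGet (mat : List (List Int)) (i j : Nat) : Int :=
  ((mat[i]?).bind (fun r => r[j]?)).getD 0

-- for-loops with early 'return' rendered as List.any over range, in A's order.
def current_status (mat : List (List Int)) : Int :=
  if (List.range 4).any (fun i => (List.range 4).any (fun j => aGet mat i j == 2048)) then 1
  else if (List.range 4).any (fun i => (List.range 4).any (fun j => aGet mat i j == 0)) then 0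
  else if (List.range 3).any (fun i => (List.range 4).any (fun j => aGet mat i j == aGet mat (i+1) j)) then 0
  else if (List.range 4).any (fun i => (List.range 3).any (fun j => aGet mat i j == aGet mat i (j+1))) then 0
  else -1

-- ===== PORT B =====
-- inner for-loop over j in range(4): fold carrying ((won, empty, merge), last).
-- row[j] / prev[j]: under Pre_ in range, so the .getD default is unreachable.
def bRow (row : List Int) (prev : Option (List Int)) : Bool × Bool × Bool :=
  ((List.range 4).foldl (fun (st : (Bool × Bool × Bool) × Option Int) j =>
      let x := (row[j]?).getD 0
      ((st.1.1 || (x == 2048),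
        st.1.2.1 || (x == 0),
        st.1.2.2 || ((st.2.elim false (fun l => x == l)) ||
                     (prev.elim false (fun p => x == (p[j]?).getD 0)))),
       some x))
    ((false, false, false), none)).1

-- go(i, prev): recursion rendered on the remaining-row count k (i = 4 - k).
def bGo (mat : List (List Int)) : Nat → Option (List Int) → Bool × Bool × Bool
  | 0, _ => (false, false, false)
  | k+1, prev =>
    let row := (mat[4 - (k+1)]?).getD []
    let f := bRow row prev
    let f2 := bGo mat k (some row)
    (f.1 || f2.1, f.2.1 || f2.2.1, f.2.2 || f2.2.2)

def current_status_alt (mat : List (List Int)) : Int :=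
  let f := bGo mat 4 none
  if f.1 then 1 else if f.2.1 then 0 else if f.2.2 then 0 else -1

-- ===== PRECONDITION & SPEC =====
-- Pre_ excludes matrices lacking a full 4x4 top-left block: B raises IndexError on all of
-- them, and A raises IndexError too except when it finds a 2048 before the first missing cell.
def Pre_current_status (mat : List (List Int)) : Prop :=
  (decide (4 ≤ mat.length) && (mat.take 4).all (fun r => decide (4 ≤ r.length))) = true
instance (mat : List (List Int)) : Decidable (Pre_current_status mat) := by
  unfold Pre_current_status; infer_instance

def pvWitness_current_status : List (List Int) :=
  [[2,4,8,16],[32,64,128,256],[512,1024,2,4],[8,16,32,64]]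

def Spec_current_status (mat : List (List Int)) (out : Int) : Prop := out = current_status_alt mat
instance (mat : List (List Int)) (out : Int) : Decidable (Spec_current_status mat out) := by
  unfold Spec_current_status; infer_instance

-- ===== CLAIM (what is proved, stated in full; the proofs are below) =====
def Claim_equal_current_status : Prop := ∀ (mat : List (List Int)), Dom_current_status mat → Pre_current_status mat → Spec_current_status mat (current_status mat)

-- ===== LEMMAS AND PROOFS =====
lemma chain (W Z V H W' Z' M' : Bool) (hW : W = W') (hZ : Z = Z') (hM : (V || H) = M') :
    (if W then (1:Int) else if Z then 0 else if V then 0 else if H then 0 else -1)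
      = (if W' then 1 else if Z' then 0 else if M' then 0 else -1) := by
  subst hW hZ hM
  cases W <;> cases Z <;> cases V <;> cases H <;> rfl

set_option maxHeartbeats 2000000 in
set_option maxRecDepth 4000 in
lemma key (a0 a1 a2 a3 b0 b1 b2 b3 c0 c1 c2 c3 d0 d1 d2 d3 : Int)
    (t0 t1 t2 t3 : List Int) (rest : List (List Int)) :
    current_status ((a0::a1::a2::a3::t0)::(b0::b1::b2::b3::t1)::(c0::c1::c2::c3::t2)::(d0::d1::d2::d3::t3)::rest)
      = current_status_alt ((a0::a1::a2::a3::t0)::(b0::b1::b2::b3::t1)::(c0::c1::c2::c3::t2)::(d0::d1::d2::d3::t3)::rest) := by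
  simp only [current_status, current_status_alt, aGet, bGo, bRow,
    List.range_succ, List.range_zero, List.foldl_append, List.foldl_cons, List.foldl_nil,
    List.any_append, List.any_cons, List.any_nil,
    List.getElem?_cons_zero, List.getElem?_cons_succ, Nat.reduceSub, Nat.reduceAdd,
    Option.bind_some, Option.getD_some, Option.elim,
    Bool.or_false, Bool.false_or]
  apply chain <;>
    · simp only [Bool.beq_comm, Bool.or_assoc]
      try ac_rfl

lemma full_case (mat : List (List Int)) (hlen : 4 ≤ mat.length)
    (hrows : ∀ r ∈ mat.take 4, 4 ≤ r.length) :
    current_status mat = current_status_alt mat := by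
  match mat, hlen with
  | r0::r1::r2::r3::rest, _ =>
    have h0 := hrows r0 (by simp [List.take])
    have h1 := hrows r1 (by simp [List.take])
    have h2 := hrows r2 (by simp [List.take])
    have h3 := hrows r3 (by simp [List.take])
    match r0, h0 with
    | a0::a1::a2::a3::t0, _ =>
    match r1, h1 with
    | b0::b1::b2::b3::t1, _ =>
    match r2, h2 with
    | c0::c1::c2::c3::t2, _ =>
    match r3, h3 with
    | d0::d1::d2::d3::t3, _ =>
      exact key a0 a1 a2 a3 b0 b1 b2 b3 c0 c1 c2 c3 d0 d1 d2 d3 t0 t1 t2 t3 rest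

-- ===== VERDICT (by name: the statement is the Claim_ definition above) =====
theorem current_status_spec : Claim_equal_current_status := by
  intro mat _ hpre
  simp only [Pre_current_status, Bool.and_eq_true, decide_eq_true_eq, List.all_eq_true] at hpre
  exact full_case mat hpre.1 hpre.2
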